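-- pv_equiv track=rewrite | github.com/Unknown27s/Astro_bot | rag/query_router.py | _extract_query_metadata
-- ===== SOURCE A (Python) =====
-- def _extract_query_metadata(text: str) -> tuple[dict, int]:
--     """Extract expected department/document_type filters and complexity score."""
--     filters = {}
--
--     # Department rules
--     if "library" in text:
--         filters["department"] = "library"
--     elif "admission" in text:
--         filters["department"] = "admissions"
--     elif "placement" in text:
--         filters["department"] = "placements"
--     elif "hostel" in text:
--         filters["department"] = "hostel"
--
--     # Document type rules
--     if "policy" in text or "rules" in text:
--         filters["document_type"] = "policy"
--     elif "syllabus" in text: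
--         filters["document_type"] = "syllabus"
--     elif "schedule" in text or "calendar" in text or "timetable" in text:
--         filters["document_type"] = "schedule"
--
--     # Complexity rules
--     words = text.split()
--     complexity_score = 1
--     if len(words) > 12 or any(w in text for w in ["explain", "describe", "detail", "process", "difference"]):
--         complexity_score = 3
--     elif len(words) > 6 or any(w in text for w in ["how", "why"]):
--         complexity_score = 2
--
--     return filters, complexity_score
-- ===== SOURCE B (Python) =====
-- KEYWORDS = ["library", "admission", "placement", "hostel",
--             "policy", "rules", "syllabus", "schedule", "calendar", "timetable",
--             "explain", "describe", "detail", "process", "difference", "how", "why"]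
--
-- def _extract_query_metadata(text: str) -> tuple[dict, int]:
--     # One pass over the characters: count words (maximal non-whitespace runs,
--     # = len(text.split())) and collect every keyword occurring as a substring
--     # (prefix test at each position) into `found`; then decode from `found`.
--     found = set()
--     n_words = 0
--     in_word = False
--     for i in range(len(text)):
--         if text[i].isspace():
--             in_word = False
--         else:
--             if not in_word:
--                 n_words += 1
--             in_word = True
--         for kw in KEYWORDS:
--             if kw not in found and text.startswith(kw, i):
--                 found.add(kw)
--
--     filters = {}
--     if "library" in found:
--         filters["department"] = "library"
--     elif "admission" in found:
--         filters["department"] = "admissions"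
--     elif "placement" in found:
--         filters["department"] = "placements"
--     elif "hostel" in found:
--         filters["department"] = "hostel"
--     if "policy" in found or "rules" in found:
--         filters["document_type"] = "policy"
--     elif "syllabus" in found:
--         filters["document_type"] = "syllabus"
--     elif "schedule" in found or "calendar" in found or "timetable" in found:
--         filters["document_type"] = "schedule"
--
--     if n_words > 12 or "explain" in found or "describe" in found or "detail" in found or "process" in found or "difference" in found:
--         complexity_score = 3
--     elif n_words > 6 or "how" in found or "why" in found:
--         complexity_score = 2
--     else:
--         complexity_score = 1
--     return filters, complexity_score
-- ===== Notes on version B (the rewrite author's own statement) =====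
-- stated objective: alternative
-- what changed: B makes a single character-level pass over the text that counts words (maximal non-whitespace runs, replacing split()) and collects every occurring keyword into a found-set via prefix tests at each position (replacing 17 independent substring searches), then decodes filters and complexity from that set.
import Mathlib
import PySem

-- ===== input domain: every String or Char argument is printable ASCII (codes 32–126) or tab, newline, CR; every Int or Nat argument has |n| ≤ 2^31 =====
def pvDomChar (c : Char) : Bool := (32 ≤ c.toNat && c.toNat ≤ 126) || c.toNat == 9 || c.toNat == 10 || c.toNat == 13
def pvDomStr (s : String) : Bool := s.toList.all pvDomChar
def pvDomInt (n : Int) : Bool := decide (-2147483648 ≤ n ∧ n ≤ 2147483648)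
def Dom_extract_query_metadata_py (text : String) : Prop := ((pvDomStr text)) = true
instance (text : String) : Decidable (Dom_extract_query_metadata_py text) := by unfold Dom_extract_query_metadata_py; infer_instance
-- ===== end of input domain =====

-- B replaces A's repeated substring searches and split() by ONE character-level pass that
-- counts words and collects the occurring keywords into a set, then decodes from that set
-- (objective: alternative); same return value everywhere.

-- ===== PORT A =====
def extract_query_metadata_py (text : String) : (List (String × String)) × Int :=
  let filters : PySem.Dict String String := PySem.Dict.empty
  let filters :=
    if PySem.Str.isIn "library" text then filters.insert "department" "library"
    else if PySem.Str.isIn "admission" text then filters.insert "department" "admissions"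
    else if PySem.Str.isIn "placement" text then filters.insert "department" "placements"
    else if PySem.Str.isIn "hostel" text then filters.insert "department" "hostel"
    else filters
  let filters :=
    if PySem.Str.isIn "policy" text || PySem.Str.isIn "rules" text then filters.insert "document_type" "policy"
    else if PySem.Str.isIn "syllabus" text then filters.insert "document_type" "syllabus"
    else if PySem.Str.isIn "schedule" text || PySem.Str.isIn "calendar" text || PySem.Str.isIn "timetable" text then
      filters.insert "document_type" "schedule"
    else filters
  let words := PySem.Str.split₀ text
  let complexity_score : Int := 1
  let complexity_score :=
    if decide (words.length > 12) ||
       (["explain", "describe", "detail", "process", "difference"].any (fun w => PySem.Str.isIn w text)) then (3 : Int)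
    else if decide (words.length > 6) || (["how", "why"].any (fun w => PySem.Str.isIn w text)) then (2 : Int)
    else complexity_score
  (filters.items, complexity_score)

-- ===== PORT B =====
def pvKeywords : List (List Char) :=
  ["library".toList, "admission".toList, "placement".toList, "hostel".toList,
   "policy".toList, "rules".toList, "syllabus".toList, "schedule".toList,
   "calendar".toList, "timetable".toList, "explain".toList, "describe".toList,
   "detail".toList, "process".toList, "difference".toList, "how".toList, "why".toList]

-- the inner `for kw in KEYWORDS` body at one position (text.startswith(kw, i) on the suffix)
def pvMarkAt (suf : List Char) (found : PySem.Set (List Char)) : PySem.Set (List Char) :=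
  pvKeywords.foldl
    (fun f kw => if !(PySem.Set.contains f kw) && PySem.Chars.startswith suf kw then PySem.Set.add f kw else f)
    found

-- the single pass: word count (maximal non-whitespace runs) fused with keyword collection
def pvScan : List Char → PySem.Set (List Char) → Int → Bool → PySem.Set (List Char) × Int
  | [], found, n, _ => (found, n)
  | c :: rest, found, n, inW =>
      let isw := PySem.Chars.isspace c
      let n' := if isw then n else if inW then n else n + 1
      pvScan rest (pvMarkAt (c :: rest) found) n' (!isw)

def extract_query_metadata_py_alt (text : String) : (List (String × String)) × Int :=
  match pvScan text.toList PySem.Set.empty 0 false with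
  | (found, n_words) =>
    let filters : PySem.Dict String String := PySem.Dict.empty
    let filters :=
      if PySem.Set.contains found "library".toList then filters.insert "department" "library"
      else if PySem.Set.contains found "admission".toList then filters.insert "department" "admissions"
      else if PySem.Set.contains found "placement".toList then filters.insert "department" "placements"
      else if PySem.Set.contains found "hostel".toList then filters.insert "department" "hostel"
      else filters
    let filters :=
      if PySem.Set.contains found "policy".toList || PySem.Set.contains found "rules".toList then
        filters.insert "document_type" "policy"
      else if PySem.Set.contains found "syllabus".toList then filters.insert "document_type" "syllabus"
      else if PySem.Set.contains found "schedule".toList || PySem.Set.contains found "calendar".toList ||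
              PySem.Set.contains found "timetable".toList then filters.insert "document_type" "schedule"
      else filters
    let complexity_score : Int :=
      if decide (n_words > 12) || PySem.Set.contains found "explain".toList ||
         PySem.Set.contains found "describe".toList || PySem.Set.contains found "detail".toList ||
         PySem.Set.contains found "process".toList || PySem.Set.contains found "difference".toList then 3
      else if decide (n_words > 6) || PySem.Set.contains found "how".toList ||
              PySem.Set.contains found "why".toList then 2
      else 1
    (filters.items, complexity_score)

-- ===== PRECONDITION & SPEC =====
def Spec_extract_query_metadata_py (text : String) (out : (List (String × String)) × Int) : Prop := out = extract_query_metadata_py_alt text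
instance (text : String) (out : (List (String × String)) × Int) : Decidable (Spec_extract_query_metadata_py text out) := by unfold Spec_extract_query_metadata_py; infer_instance

-- ===== CLAIM (what is proved, stated in full; the proofs are below) =====
def Claim_equal_extract_query_metadata_py : Prop := ∀ (text : String), Dom_extract_query_metadata_py text → Spec_extract_query_metadata_py text (extract_query_metadata_py text)

-- ===== LEMMAS AND PROOFS =====

-- word count of the scan, unfused
def pvWC : List Char → Bool → Nat
  | [], _ => 0
  | c :: rest, inW =>
      if PySem.Chars.isspace c then pvWC rest false
      else (if inW then 0 else 1) + pvWC rest true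

-- keyword occurrence: kw is a prefix of some nonempty suffix
def pvOcc (kw : List Char) : List Char → Bool
  | [] => false
  | c :: rest => PySem.Chars.startswith (c :: rest) kw || pvOcc kw rest

-- keyword collection of the scan, unfused
def pvFoundLoop : List Char → PySem.Set (List Char) → PySem.Set (List Char)
  | [], f => f
  | c :: rest, f => pvFoundLoop rest (pvMarkAt (c :: rest) f)

theorem pv_contains_add (s : PySem.Set (List Char)) (x k : List Char) :
    PySem.Set.contains (PySem.Set.add s x) k = (PySem.Set.contains s k || k == x) := by
  simp only [PySem.Set.add]
  split_ifs with h
  · by_cases hk : k = x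
    · subst hk; simp at h; simp [h]
    · simp [hk]
  · by_cases hk : k = x
    · subst hk; simp
    · simp [hk, PySem.Set.contains]

theorem pv_mark_contains (suf : List Char) (f : PySem.Set (List Char)) (k : List Char) :
    PySem.Set.contains (pvMarkAt suf f) k
      = (PySem.Set.contains f k || (decide (k ∈ pvKeywords) && PySem.Chars.startswith suf k)) := by
  unfold pvMarkAt
  generalize pvKeywords = ks
  induction ks generalizing f with
  | nil => simp
  | cons kw ks ih =>
    simp only [List.foldl_cons, ih, List.mem_cons]
    by_cases hb : (!(PySem.Set.contains f kw) && PySem.Chars.startswith suf kw)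
    · rw [if_pos hb, pv_contains_add]
      by_cases hk : k = kw
      · subst hk
        simp at hb
        simp [hb.2]
      · simp [hk, show (k == kw) = false from by simpa using hk]
    · rw [if_neg (by simpa using hb)]
      by_cases hk : k = kw
      · subst hk
        simp only [Bool.and_eq_true, Bool.not_eq_true'] at hb
        by_cases hc : PySem.Set.contains f k
        · have hk' : k ∈ f := by simpa using hc
          simp [hk']
        · have hsw : PySem.Chars.startswith suf k = false := by
            by_contra h'
            exact hb ⟨by simpa using hc, by simpa using h'⟩
          simp [hsw]
      · simp [hk]

theorem pv_foundLoop_contains (s : List Char) (f : PySem.Set (List Char)) (k : List Char) :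
    PySem.Set.contains (pvFoundLoop s f) k
      = (PySem.Set.contains f k || (decide (k ∈ pvKeywords) && pvOcc k s)) := by
  induction s generalizing f with
  | nil => simp [pvFoundLoop, pvOcc]
  | cons c rest ih =>
    simp only [pvFoundLoop, ih, pv_mark_contains, pvOcc]
    cases PySem.Set.contains f k <;> cases h : decide (k ∈ pvKeywords) <;>
      cases PySem.Chars.startswith (c :: rest) k <;> simp

theorem pv_occ_iff (kw : List Char) (hne : kw ≠ []) (s : List Char) :
    pvOcc kw s = true ↔ ∃ j, kw <+: s.drop j := by
  induction s with
  | nil =>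
    simp only [pvOcc, Bool.false_eq_true, false_iff]
    rintro ⟨j, hj⟩
    simp only [List.drop_nil] at hj
    exact hne (List.prefix_nil.mp hj)
  | cons c rest ih =>
    simp only [pvOcc, Bool.or_eq_true, PySem.Chars.startswith_iff, ih]
    constructor
    · rintro (h | ⟨j, hj⟩)
      · exact ⟨0, by simpa using h⟩
      · exact ⟨j + 1, by simpa using hj⟩
    · rintro ⟨j, hj⟩
      cases j with
      | zero => exact Or.inl (by simpa using hj)
      | succ j => exact Or.inr ⟨j, by simpa using hj⟩

theorem pv_occ_eq_isIn (kw : List Char) (hne : kw ≠ []) (s : List Char) :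
    pvOcc kw s = PySem.Chars.isIn kw s := by
  have h1 := PySem.Chars.exists_prefix_drop_iff_isIn (sub := kw) (s := s)
  by_cases h : pvOcc kw s = true
  · rw [h, h1.mp ((pv_occ_iff kw hne s).mp h)]
  · have h' : pvOcc kw s = false := by simpa using h
    have h2 : PySem.Chars.isIn kw s = false := by
      cases hin : PySem.Chars.isIn kw s
      · rfl
      · exact absurd ((pv_occ_iff kw hne s).mpr (h1.mpr hin)) h
    rw [h', h2]

theorem pv_found_eq (kw : List Char) (hne : kw ≠ []) (hmem : kw ∈ pvKeywords) (s : List Char) :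
    PySem.Set.contains (pvFoundLoop s PySem.Set.empty) kw = PySem.Chars.isIn kw s := by
  rw [pv_foundLoop_contains, pv_occ_eq_isIn kw hne s]
  simp [hmem, PySem.Set.empty, PySem.Set.contains]

theorem pv_scan_eq (s : List Char) (f : PySem.Set (List Char)) (n : Int) (inW : Bool) :
    pvScan s f n inW = (pvFoundLoop s f, n + (pvWC s inW : Int)) := by
  induction s generalizing f n inW with
  | nil => simp [pvScan, pvFoundLoop, pvWC]
  | cons c rest ih =>
    simp only [pvScan, pvFoundLoop, pvWC, ih]
    by_cases h : PySem.Chars.isspace c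
    · simp [h]
    · have h' : PySem.Chars.isspace c = false := by simpa using h
      cases inW <;> simp [h'] <;> omega

theorem pv_go_length (s : List Char) (cur : List Char) (acc : List (List Char)) :
    (PySem.Chars.split₀.go s cur acc).length
      = acc.length + (if cur.isEmpty then 0 else 1) + pvWC s (!cur.isEmpty) := by
  induction s generalizing cur acc with
  | nil =>
    by_cases h : cur.isEmpty <;> simp [PySem.Chars.split₀.go, h, pvWC]
  | cons c rest ih =>
    by_cases hs : PySem.Chars.isspace c
    · by_cases h : cur.isEmpty
      · simp [PySem.Chars.split₀.go, hs, h, ih, pvWC]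
      · simp only [PySem.Chars.split₀.go, hs, if_pos, h, if_neg, Bool.false_eq_true, not_false_iff, ih, pvWC]
        simp
    · have hs' : PySem.Chars.isspace c = false := by simpa using hs
      by_cases h : cur.isEmpty <;>
        · simp [PySem.Chars.split₀.go, hs', h, ih, pvWC] <;> omega

theorem pv_split₀_length (s : List Char) :
    (PySem.Chars.split₀ s).length = pvWC s false := by
  have := pv_go_length s [] []
  simpa [PySem.Chars.split₀] using this

theorem pv_decide_gt (w : Nat) (t : Int) (tn : Nat) (ht : t = (tn : Int)) :
    decide ((0 : Int) + (w : Int) > t) = decide (w > tn) := by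
  subst ht
  rw [decide_eq_decide]
  omega

-- ===== VERDICT (by name: the statement is the Claim_ definition above) =====
theorem extract_query_metadata_py_spec : Claim_equal_extract_query_metadata_py := by
  intro text _
  unfold Spec_extract_query_metadata_py extract_query_metadata_py extract_query_metadata_py_alt
  rw [pv_scan_eq]
  simp only [PySem.Str.isIn_eq]
  rw [pv_found_eq "library".toList (by decide) (by decide),
      pv_found_eq "admission".toList (by decide) (by decide),
      pv_found_eq "placement".toList (by decide) (by decide),
      pv_found_eq "hostel".toList (by decide) (by decide),
      pv_found_eq "policy".toList (by decide) (by decide),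
      pv_found_eq "rules".toList (by decide) (by decide),
      pv_found_eq "syllabus".toList (by decide) (by decide),
      pv_found_eq "schedule".toList (by decide) (by decide),
      pv_found_eq "calendar".toList (by decide) (by decide),
      pv_found_eq "timetable".toList (by decide) (by decide),
      pv_found_eq "explain".toList (by decide) (by decide),
      pv_found_eq "describe".toList (by decide) (by decide),
      pv_found_eq "detail".toList (by decide) (by decide),
      pv_found_eq "process".toList (by decide) (by decide),
      pv_found_eq "difference".toList (by decide) (by decide),
      pv_found_eq "how".toList (by decide) (by decide),
      pv_found_eq "why".toList (by decide) (by decide),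
      pv_decide_gt (pvWC text.toList false) 12 12 rfl,
      pv_decide_gt (pvWC text.toList false) 6 6 rfl]
  simp only [PySem.Str.split₀, List.length_map, pv_split₀_length, List.any, Bool.or_assoc,
    Bool.or_false]
  split_ifs <;> rfl
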